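-- pv_equiv track=rewrite | github.com/PlasticTurd/Python---2048-in-122-lines | CustomTools.py | CustomSort
-- ===== SOURCE A (Python) =====
-- def CustomSort(a, axis):
--     e = []
--     t = 0
--     while t < 4:
--         b = []
--         for item in a[t]:
--             b.append(item)
--         if axis == 3 or axis == 1:
--             b.sort(key=bool, reverse=True)
--         else:
--             b.sort(key=bool)
--         e.append([b])
--         t = t + 1
--     return e
-- ===== SOURCE B (Python) =====
-- def CustomSort(a, axis):
--     e = []
--     for t in range(4):
--         row = a[t]
--         truthy = [x for x in row if x]
--         falsy = [x for x in row if not x]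
--         e.append([truthy + falsy] if axis == 3 or axis == 1 else [falsy + truthy])
--     return e
-- ===== Notes on version B (the rewrite author's own statement) =====
-- stated objective: idiomatic
-- what changed: Replaces list.sort(key=bool, reverse=...) on a copy of each row with an explicit stable partition: two comprehensions (truthy/falsy) concatenated per axis.
import Mathlib
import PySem

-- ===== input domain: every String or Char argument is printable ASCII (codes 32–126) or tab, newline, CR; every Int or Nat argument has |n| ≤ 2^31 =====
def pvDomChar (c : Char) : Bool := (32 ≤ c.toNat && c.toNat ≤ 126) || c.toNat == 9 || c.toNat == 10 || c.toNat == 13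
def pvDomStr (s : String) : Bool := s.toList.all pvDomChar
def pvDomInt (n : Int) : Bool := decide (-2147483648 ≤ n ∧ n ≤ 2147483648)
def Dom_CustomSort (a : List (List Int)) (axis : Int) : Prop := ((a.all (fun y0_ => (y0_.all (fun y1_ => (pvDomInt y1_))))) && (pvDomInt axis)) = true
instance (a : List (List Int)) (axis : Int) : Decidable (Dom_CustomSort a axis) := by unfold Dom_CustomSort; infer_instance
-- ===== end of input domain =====

-- B replaces A's per-row sort(key=bool) with an explicit stable partition (two filters concatenated); idiomatic, same behaviour.


-- ===== PORT A =====
-- while t < 4: copy a[t] element by element, sort it by bool key, append [b].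
-- a[t] is PySem.List.pyGetD with default []; inside Pre_ (4 ≤ a.length) the default is never taken.
def CustomSortLoop (a : List (List Int)) (axis : Int) :
    Nat → Nat → List (List (List Int)) → List (List (List Int))
  | _, 0, e => e
  | t, fuel + 1, e =>
      if t < 4 then
        let b := (PySem.List.pyGetD a (t : Int) []).foldl (fun b item => b ++ [item]) []
        let b :=
          if axis == 3 || axis == 1 then
            PySem.List.sorted b (fun x => decide (x ≠ 0)) true
          else
            PySem.List.sorted b (fun x => decide (x ≠ 0)) false
        CustomSortLoop a axis (t + 1) fuel (e ++ [[b]])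
      else e

def CustomSort (a : List (List Int)) (axis : Int) : List (List (List Int)) :=
  CustomSortLoop a axis 0 4 []

-- ===== PORT B =====
def CustomSort_alt (a : List (List Int)) (axis : Int) : List (List (List Int)) :=
  (List.range 4).foldl
    (fun e t =>
      let row := PySem.List.pyGetD a (t : Int) []
      let truthy := row.filter (fun x => decide (x ≠ 0))
      let falsy := row.filter (fun x => decide (x = 0))
      e ++ [if axis == 3 || axis == 1 then [truthy ++ falsy] else [falsy ++ truthy]])
    []

-- ===== PRECONDITION & SPEC =====
-- Python A raises IndexError on a[t] when len(a) < 4; exactly those inputs are excluded.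
def Pre_CustomSort (a : List (List Int)) (axis : Int) : Prop := 4 ≤ a.length
instance (a : List (List Int)) (axis : Int) : Decidable (Pre_CustomSort a axis) := by unfold Pre_CustomSort; infer_instance
def pvWitness_CustomSort : List (List Int) × Int := ([[0, 2], [1], [0, 0, 5], [3]], 1)

def Spec_CustomSort (a : List (List Int)) (axis : Int) (out : List (List (List Int))) : Prop := out = CustomSort_alt a axis
instance (a : List (List Int)) (axis : Int) (out : List (List (List Int))) : Decidable (Spec_CustomSort a axis out) := by unfold Spec_CustomSort; infer_instance

-- ===== CLAIM (what is proved, stated in full; the proofs are below) =====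
def Claim_equal_CustomSort : Prop := ∀ (a : List (List Int)) (axis : Int), Dom_CustomSort a axis → Pre_CustomSort a axis → Spec_CustomSort a axis (CustomSort a axis)

-- ===== LEMMAS AND PROOFS =====

-- insertBy puts x exactly between a "no" prefix and a "yes" suffix.
theorem insertBy_mid {α : Type} (before : α → α → Bool) (x : α) (F T : List α)
    (hF : ∀ y ∈ F, before x y = false) (hT : ∀ y ∈ T, before x y = true) :
    PySem.List.insertBy before x (F ++ T) = F ++ x :: T := by
  induction F with
  | nil =>
      cases T with
      | nil => rfl
      | cons y ys =>
          simp [PySem.List.insertBy, hT y (by simp)]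
  | cons f F ih =>
      simp only [List.cons_append, PySem.List.insertBy, hF f (by simp)]
      simp only [Bool.false_eq_true, if_false, List.cons.injEq, true_and]
      exact ih (fun y hy => hF y (by simp [hy])) 

-- loop invariant for insertion sort with a boolean key: the accumulator stays a partition.
theorem foldl_insertBy_partition {α : Type} (p : α → Bool) (row : List α) :
    ∀ (F T : List α), (∀ y ∈ F, p y = false) → (∀ y ∈ T, p y = true) →
    row.foldl (fun acc x => PySem.List.insertBy (fun a b => !p a && p b) x acc) (F ++ T)
      = (F ++ row.filter (fun x => !p x)) ++ (T ++ row.filter p) := by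
  induction row with
  | nil => intro F T _ _; simp
  | cons x row ih =>
      intro F T hF hT
      simp only [List.foldl_cons]
      by_cases hx : p x = true
      · have h1 : PySem.List.insertBy (fun a b => !p a && p b) x (F ++ T) = F ++ (T ++ [x]) := by
          rw [← List.append_assoc]
          exact PySem.List.insertBy_of_forall_not_before _ _ _ (fun y _ => by simp [hx])
        have hT' : ∀ y ∈ T ++ [x], p y = true := by
          intro y hy
          rcases List.mem_append.mp hy with h | h
          · exact hT y h
          · simp at h; simp [h, hx]
        rw [h1, ih F (T ++ [x]) hF hT']
        simp [hx, List.append_assoc]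
      · have hx' : p x = false := by simpa using hx
        have h1 : PySem.List.insertBy (fun a b => !p a && p b) x (F ++ T) = (F ++ [x]) ++ T := by
          rw [List.append_assoc]
          exact insertBy_mid _ _ _ _ (fun y hy => by simp [hx', hF y hy]) (fun y hy => by simp [hx', hT y hy])
        have hF' : ∀ y ∈ F ++ [x], p y = false := by
          intro y hy
          rcases List.mem_append.mp hy with h | h
          · exact hF y h
          · simp at h; simp [h, hx']
        rw [h1, ih (F ++ [x]) T hF' hT]
        simp [hx', List.append_assoc]

theorem bool_lt_eq (a b : Bool) : decide (a < b) = (!a && b) := by cases a <;> cases b <;> rfl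

-- sorted(row, key=bool) is the stable partition falsy ++ truthy.
theorem sorted_bool_false (row : List Int) :
    PySem.List.sorted row (fun x => decide (x ≠ 0)) false
      = row.filter (fun x => decide (x = 0)) ++ row.filter (fun x => decide (x ≠ 0)) := by
  rw [PySem.List.sorted_eq_foldl_insertBy]
  have h := foldl_insertBy_partition (fun x : Int => decide (x ≠ 0)) row [] [] (by simp) (by simp)
  simp only [List.nil_append, List.append_nil] at h
  have hfun : (fun (a b : Int) => decide ((fun x : Int => decide (x ≠ 0)) a < (fun x : Int => decide (x ≠ 0)) b))
      = (fun a b => !(decide (a ≠ 0)) && decide (b ≠ 0)) := by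
    funext a b; exact bool_lt_eq _ _
  rw [hfun, h]
  congr 1
  apply List.filter_congr; intro x _; by_cases hx : x = 0 <;> simp [hx]

-- sorted(row, key=bool, reverse=True) is the stable partition truthy ++ falsy.
theorem sorted_bool_true (row : List Int) :
    PySem.List.sorted row (fun x => decide (x ≠ 0)) true
      = row.filter (fun x => decide (x ≠ 0)) ++ row.filter (fun x => decide (x = 0)) := by
  rw [PySem.List.sorted_rev_eq_foldl_insertBy]
  have h := foldl_insertBy_partition (fun x : Int => decide (x = 0)) row [] [] (by simp) (by simp)
  simp only [List.nil_append, List.append_nil] at h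
  have hfun : (fun (a b : Int) => decide ((fun x : Int => decide (x ≠ 0)) b < (fun x : Int => decide (x ≠ 0)) a))
      = (fun a b => !(decide (a = 0)) && decide (b = 0)) := by
    funext a b
    rw [bool_lt_eq]
    by_cases ha : a = 0 <;> by_cases hb : b = 0 <;> simp [ha, hb]
  rw [hfun, h]
  congr 1
  apply List.filter_congr; intro x _; by_cases hx : x = 0 <;> simp [hx]

-- copying a row element by element is the identity.
theorem copy_row (row : List Int) : row.foldl (fun b item => b ++ [item]) [] = row :=
  PySem.List.foldl_append_singleton row []

theorem row_case (a : List (List Int)) (axis : Int) (t : Nat) :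
    (if axis == 3 || axis == 1 then
        PySem.List.sorted ((PySem.List.pyGetD a (t : Int) []).foldl (fun b item => b ++ [item]) []) (fun x => decide (x ≠ 0)) true
      else
        PySem.List.sorted ((PySem.List.pyGetD a (t : Int) []).foldl (fun b item => b ++ [item]) []) (fun x => decide (x ≠ 0)) false)
    = (if axis == 3 || axis == 1 then
        (PySem.List.pyGetD a (t : Int) []).filter (fun x => decide (x ≠ 0)) ++ (PySem.List.pyGetD a (t : Int) []).filter (fun x => decide (x = 0))
      else
        (PySem.List.pyGetD a (t : Int) []).filter (fun x => decide (x = 0)) ++ (PySem.List.pyGetD a (t : Int) []).filter (fun x => decide (x ≠ 0))) := by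
  rw [copy_row]
  split_ifs with h
  · exact sorted_bool_true _
  · exact sorted_bool_false _

-- ===== VERDICT (by name: the statement is the Claim_ definition above) =====
theorem CustomSort_spec : Claim_equal_CustomSort := by
  intro a axis _ _
  unfold Spec_CustomSort CustomSort CustomSort_alt
  simp only [CustomSortLoop, List.range_succ, List.range_zero, Nat.ofNat_pos, if_true,
    row_case a axis]
  by_cases h : axis = 3 ∨ axis = 1 <;> simp [h]
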